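-- pv_equiv track=rewrite | github.com/fkguo/autoresearch-lab | skills/research-team/scripts/bin/update_project_map.py | _parse_project_map_auto_state
-- ===== SOURCE A (Python) =====
-- AUTO_START = "<!-- PROJECT_INDEX_AUTO_START -->"
--
-- AUTO_END = "<!-- PROJECT_INDEX_AUTO_END -->"
--
-- def _parse_project_map_auto_state(text: str) -> dict[str, str]:
--     """
--     Best-effort parse of the auto block so we can update one side (team/draft)
--     without deleting the other.
--     """
--     out: dict[str, str] = {
--         "team_tag": "",
--         "team_status": "",
--         "draft_tag": "",
--         "draft_status": "",
--     }
--     if AUTO_START not in text or AUTO_END not in text: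
--         return out
--     a = text.index(AUTO_START) + len(AUTO_START)
--     b = text.index(AUTO_END)
--     block = text[a:b]
--     for ln in block.splitlines():
--         s = ln.strip()
--         if s.lower().startswith("- team latest tag:"):
--             out["team_tag"] = s.split(":", 1)[1].strip()
--         elif s.lower().startswith("- team latest status:"):
--             out["team_status"] = s.split(":", 1)[1].strip()
--         elif s.lower().startswith("- draft latest tag:"):
--             out["draft_tag"] = s.split(":", 1)[1].strip()
--         elif s.lower().startswith("- draft latest status:"):
--             out["draft_status"] = s.split(":", 1)[1].strip()
--     return out
-- ===== SOURCE B (Python) =====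
-- AUTO_START = "<!-- PROJECT_INDEX_AUTO_START -->"
--
-- AUTO_END = "<!-- PROJECT_INDEX_AUTO_END -->"
--
--
-- def _parse_project_map_auto_state(text: str) -> dict[str, str]:
--     """Index every 'label: value' line of the auto block by its lowercased
--     label (last occurrence wins), then project the four fixed labels."""
--     if AUTO_START not in text or AUTO_END not in text:
--         block = ""
--     else:
--         a = text.index(AUTO_START) + len(AUTO_START)
--         block = text[a:text.index(AUTO_END)]
--     idx: dict[str, str] = {}
--     for ln in block.splitlines():
--         head, sep, tail = ln.strip().partition(":")
--         if sep:
--             idx[head.lower()] = tail.strip()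
--     return {
--         "team_tag": idx.get("- team latest tag", ""),
--         "team_status": idx.get("- team latest status", ""),
--         "draft_tag": idx.get("- draft latest tag", ""),
--         "draft_status": idx.get("- draft latest status", ""),
--     }
-- ===== Notes on version B (the rewrite author's own statement) =====
-- stated objective: alternative
-- what changed: Replaces the per-line four-way startswith branch chain with a build-a-table-then-project decomposition: one pass indexes each colon-containing line of the block by its lowercased label (text before the first colon; last occurrence wins), then the four fixed labels are looked up with an empty-string default.
import Mathlib
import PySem

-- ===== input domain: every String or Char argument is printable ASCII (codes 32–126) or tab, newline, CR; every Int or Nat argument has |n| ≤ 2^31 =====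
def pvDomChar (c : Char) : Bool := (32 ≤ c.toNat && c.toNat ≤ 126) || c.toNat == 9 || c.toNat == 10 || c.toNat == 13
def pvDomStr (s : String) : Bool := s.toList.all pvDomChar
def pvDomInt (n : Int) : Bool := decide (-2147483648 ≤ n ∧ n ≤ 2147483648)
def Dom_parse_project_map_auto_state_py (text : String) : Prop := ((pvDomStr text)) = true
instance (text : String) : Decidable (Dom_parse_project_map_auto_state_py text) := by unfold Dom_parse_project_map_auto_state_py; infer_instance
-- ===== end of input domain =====

-- B replaces A's per-line four-way startswith branch chain by a build-a-table-then-project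
-- decomposition (index the lines by lowercased label, then look up the four fixed labels).

-- ===== PORT A =====
def pmAS : List Char := "<!-- PROJECT_INDEX_AUTO_START -->".toList
def pmAE : List Char := "<!-- PROJECT_INDEX_AUTO_END -->".toList

-- A's dict 'out' has exactly the four fixed keys, updated in place: mirrored as a 4-tuple
-- (team_tag, team_status, draft_tag, draft_status), rendered by pmWrapA at the returns.
def pmWrapA (st : List Char × List Char × List Char × List Char) : List (String × String) :=
  [("team_tag", String.ofList st.1), ("team_status", String.ofList st.2.1),
   ("draft_tag", String.ofList st.2.2.1), ("draft_status", String.ofList st.2.2.2)]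

-- the body of A's 'for ln in block.splitlines()' loop
def pmStepA (st : List Char × List Char × List Char × List Char) (ln : List Char) :
    List Char × List Char × List Char × List Char :=
  let s := PySem.Chars.strip ln
  if PySem.Chars.startswith (PySem.Chars.lower s) "- team latest tag:".toList then
    (PySem.Chars.strip (PySem.List.pyGetD (PySem.Chars.splitOnMax s [':'] 1) 1 []), st.2.1, st.2.2.1, st.2.2.2)
  else if PySem.Chars.startswith (PySem.Chars.lower s) "- team latest status:".toList then
    (st.1, PySem.Chars.strip (PySem.List.pyGetD (PySem.Chars.splitOnMax s [':'] 1) 1 []), st.2.2.1, st.2.2.2)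
  else if PySem.Chars.startswith (PySem.Chars.lower s) "- draft latest tag:".toList then
    (st.1, st.2.1, PySem.Chars.strip (PySem.List.pyGetD (PySem.Chars.splitOnMax s [':'] 1) 1 []), st.2.2.2)
  else if PySem.Chars.startswith (PySem.Chars.lower s) "- draft latest status:".toList then
    (st.1, st.2.1, st.2.2.1, PySem.Chars.strip (PySem.List.pyGetD (PySem.Chars.splitOnMax s [':'] 1) 1 []))
  else st

def parse_project_map_auto_state_py (text : String) : List (String × String) :=
  let t := text.toList
  if !(PySem.Chars.isIn pmAS t) || !(PySem.Chars.isIn pmAE t) then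
    pmWrapA ([], [], [], [])
  else
    let a := PySem.Chars.find t pmAS + pmAS.length
    let b := PySem.Chars.find t pmAE
    let block := PySem.Chars.slice t (some a) (some b)
    pmWrapA ((PySem.Chars.splitlines block).foldl pmStepA ([], [], [], []))

-- ===== PORT B =====
def pmK1 : List Char := "- team latest tag".toList
def pmK2 : List Char := "- team latest status".toList
def pmK3 : List Char := "- draft latest tag".toList
def pmK4 : List Char := "- draft latest status".toList

-- the body of B's indexing loop; s.partition(":") is ported by hand (exact for the
-- one-char separator ':'): head = text before the first ':', the separator was found
-- iff the remainder is nonempty, tail = text after the first ':'.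
def pmIndexLine (d : PySem.Dict (List Char) (List Char)) (ln : List Char) :
    PySem.Dict (List Char) (List Char) :=
  let s := PySem.Chars.strip ln
  let head := s.takeWhile (· != ':')
  let rest := s.dropWhile (· != ':')
  if rest.isEmpty then d
  else d.insert (PySem.Chars.lower head) (PySem.Chars.strip rest.tail)

def parse_project_map_auto_state_py_alt (text : String) : List (String × String) :=
  let t := text.toList
  let block :=
    if !(PySem.Chars.isIn pmAS t) || !(PySem.Chars.isIn pmAE t) then []
    else PySem.Chars.slice t (some (PySem.Chars.find t pmAS + pmAS.length)) (some (PySem.Chars.find t pmAE))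
  let idx := (PySem.Chars.splitlines block).foldl pmIndexLine PySem.Dict.empty
  [("team_tag", String.ofList (idx.getD pmK1 [])),
   ("team_status", String.ofList (idx.getD pmK2 [])),
   ("draft_tag", String.ofList (idx.getD pmK3 [])),
   ("draft_status", String.ofList (idx.getD pmK4 []))]

-- ===== PRECONDITION & SPEC =====
def Spec_parse_project_map_auto_state_py (text : String) (out : List (String × String)) : Prop := out = parse_project_map_auto_state_py_alt text
instance (text : String) (out : List (String × String)) : Decidable (Spec_parse_project_map_auto_state_py text out) := by unfold Spec_parse_project_map_auto_state_py; infer_instance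

-- ===== CLAIM (what is proved, stated in full; the proofs are below) =====
def Claim_equal_parse_project_map_auto_state_py : Prop := ∀ (text : String), Dom_parse_project_map_auto_state_py text → Spec_parse_project_map_auto_state_py text (parse_project_map_auto_state_py text)

-- ===== LEMMAS AND PROOFS =====

-- lowering a char never touches ':'
lemma pm_lowerChar_ne (c : Char) : (PySem.Chars.lowerChar c != ':') = (c != ':') := by
  unfold PySem.Chars.lowerChar PySem.Chars.isupper
  have h58 : (':' : Char).toNat = 58 := rfl
  split_ifs with h
  · have h2 : 65 ≤ c.toNat ∧ c.toNat ≤ 90 := by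
      simp only [Bool.and_eq_true, decide_eq_true_eq, Char.le_def] at h
      exact h
    have ht : (Char.ofNat (c.toNat + 32)).toNat = c.toNat + 32 := by
      rw [Char.toNat_ofNat]
      have hv : (c.toNat + 32).isValidChar := by left; omega
      simp [hv]
    have e1 : (Char.ofNat (c.toNat + 32)) ≠ ':' := by
      intro he
      have := congrArg Char.toNat he
      rw [ht, h58] at this
      omega
    have e2 : c ≠ ':' := by
      intro he
      have := congrArg Char.toNat he
      rw [h58] at this
      omega
    rw [show (Char.ofNat (c.toNat + 32) != ':') = true by simp [e1],
        show (c != ':') = true by simp [e2]]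
  · rfl

theorem pm_pred_comp : ((fun x => x != ':') ∘ PySem.Chars.lowerChar) = (fun x : Char => x != ':') :=
  funext fun c => pm_lowerChar_ne c

-- lower commutes with splitting at the first colon
lemma pm_lower_takeWhile (s : List Char) :
    (PySem.Chars.lower s).takeWhile (· != ':') = PySem.Chars.lower (s.takeWhile (· != ':')) := by
  unfold PySem.Chars.lower
  rw [List.takeWhile_map, pm_pred_comp]

lemma pm_lower_dropWhile (s : List Char) :
    (PySem.Chars.lower s).dropWhile (· != ':') = PySem.Chars.lower (s.dropWhile (· != ':')) := by
  unfold PySem.Chars.lower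
  rw [List.dropWhile_map, pm_pred_comp]

-- the head of a nonempty dropWhile fails the predicate
lemma pm_dropWhile_head {α : Type} (p : α → Bool) : ∀ (s : List α) (x : α) (t : List α),
    s.dropWhile p = x :: t → p x = false := by
  intro s
  induction s with
  | nil => intro x t h; simp at h
  | cons c rest ih =>
    intro x t h
    by_cases hc : p c
    · rw [List.dropWhile_cons_of_pos hc] at h; exact ih x t h
    · rw [List.dropWhile_cons_of_neg hc] at h
      cases h; simpa using hc

-- splitOnMax.go with maxsplit exhausted returns the remainder as one piece
lemma pm_go_mzero (fuel : Nat) (l cur : List Char) (acc : List (List Char)) (hf : l.length < fuel) :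
    PySem.Chars.splitOnMax.go [':'] fuel 0 l cur acc = ((cur.reverse ++ l) :: acc).reverse := by
  cases fuel with
  | zero => omega
  | succ n =>
    cases l with
    | nil => simp [PySem.Chars.splitOnMax.go]
    | cons c rest => simp [PySem.Chars.splitOnMax.go]

-- a colon-free remainder is one piece, whatever maxsplit remains
lemma pm_go_noColon (fuel : Nat) : ∀ (l cur : List Char) (acc : List (List Char)) (m : Nat), l.length < fuel →
    (∀ c ∈ l, c ≠ ':') →
    PySem.Chars.splitOnMax.go [':'] fuel m l cur acc = ((cur.reverse ++ l) :: acc).reverse := by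
  induction fuel with
  | zero => intro l cur acc m h _; omega
  | succ n ih =>
    intro l cur acc m hf hc
    cases l with
    | nil => cases m <;> simp [PySem.Chars.splitOnMax.go]
    | cons c rest =>
      have hcn : c ≠ ':' := hc c (by simp)
      cases m with
      | zero => simp [PySem.Chars.splitOnMax.go]
      | succ m' =>
        have hpre : [':'].isPrefixOf (c :: rest) = false := by
          simp [List.isPrefixOf]
          exact fun h => absurd h.symm hcn
        simp only [PySem.Chars.splitOnMax.go, hpre]
        rw [if_neg (by omega)]
        simp only [Bool.false_eq_true, if_false]
        rw [ih rest (c :: cur) acc (m' + 1) (by simpa using Nat.lt_of_succ_lt_succ hf)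
          (fun x hx => hc x (by simp [hx]))]
        simp

-- one split left, colon present: the piece before it, then the raw rest
lemma pm_go_colon (fuel : Nat) : ∀ (h t cur : List Char) (acc : List (List Char)), h.length + 1 + t.length < fuel →
    (∀ c ∈ h, c ≠ ':') →
    PySem.Chars.splitOnMax.go [':'] fuel 1 (h ++ ':' :: t) cur acc = (t :: (cur.reverse ++ h) :: acc).reverse := by
  induction fuel with
  | zero => intro h t cur acc hf _; omega
  | succ n ih =>
    intro h t cur acc hf hc
    cases h with
    | nil =>
      have hpre : [':'].isPrefixOf (':' :: t) = true := by simp [List.isPrefixOf]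
      simp only [List.nil_append, PySem.Chars.splitOnMax.go, hpre]
      rw [if_neg (by omega)]
      simp only [if_true, List.drop_succ_cons, List.drop_zero, List.length_singleton]
      rw [pm_go_mzero n t [] (cur.reverse :: acc) (by simp at hf; omega)]
      simp
    | cons c h' =>
      have hcn : c ≠ ':' := hc c (by simp)
      have hpre : [':'].isPrefixOf (c :: (h' ++ ':' :: t)) = false := by
        simp [List.isPrefixOf]
        exact fun h => absurd h.symm hcn
      simp only [List.cons_append, PySem.Chars.splitOnMax.go, hpre]
      rw [if_neg (by omega)]
      simp only [Bool.false_eq_true, if_false]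
      rw [ih h' t (c :: cur) acc (by simp at hf ⊢; omega) (fun x hx => hc x (by simp [hx]))]
      simp

-- characterisation of s.split(":", 1) by the first colon
lemma pm_split_eq (s : List Char) :
    PySem.Chars.splitOnMax s [':'] 1 =
      if (s.dropWhile (· != ':')).isEmpty then [s]
      else [s.takeWhile (· != ':'), (s.dropWhile (· != ':')).tail] := by
  have hdef : PySem.Chars.splitOnMax s [':'] 1 = PySem.Chars.splitOnMax.go [':'] (s.length + 1) 1 s [] [] := by
    simp [PySem.Chars.splitOnMax]
  rw [hdef]
  by_cases hE : (s.dropWhile (· != ':')).isEmpty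
  · have hall : ∀ c ∈ s, c ≠ ':' := by
      intro c hcm
      have := List.dropWhile_eq_nil_iff.mp (List.isEmpty_iff.mp hE) c hcm
      simpa using this
    rw [pm_go_noColon (s.length + 1) s [] [] 1 (by omega) hall]
    simp [hE]
  · obtain ⟨x, t, hxt⟩ : ∃ x t, s.dropWhile (· != ':') = x :: t := by
      cases hd : s.dropWhile (· != ':') with
      | nil => rw [hd] at hE; simp at hE
      | cons x t => exact ⟨x, t, rfl⟩
    have hx : x = ':' := by simpa using pm_dropWhile_head (· != ':') s x t hxt
    have hsplit : s = s.takeWhile (· != ':') ++ ':' :: t := by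
      conv_lhs => rw [← List.takeWhile_append_dropWhile (p := (· != ':')) (l := s)]
      rw [hxt, hx]
    have htw : ∀ c ∈ s.takeWhile (· != ':'), c ≠ ':' := by
      intro c hcm
      have := List.mem_takeWhile_imp hcm
      simpa using this
    conv_lhs => rw [hsplit]
    rw [pm_go_colon _ _ t [] [] (by simp; omega) htw]
    simp [hxt]

-- startswith on the lowered line, for a colon-free pattern followed by ':'
lemma pm_sw (ls k : List Char) (hk : ∀ c ∈ k, c ≠ ':') :
    PySem.Chars.startswith ls (k ++ [':']) = true ↔
      ¬ (ls.dropWhile (· != ':')).isEmpty ∧ ls.takeWhile (· != ':') = k := by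
  rw [PySem.Chars.startswith_iff]
  constructor
  · rintro ⟨r, hr⟩
    rw [List.append_assoc] at hr
    subst hr
    simp only [List.singleton_append]
    have htk : (k ++ ':' :: r).takeWhile (· != ':') = k := by
      rw [List.takeWhile_append]
      rw [List.takeWhile_eq_self_iff.mpr (by intro c hc; simpa using hk c hc)]
      simp
    have hdk : (k ++ ':' :: r).dropWhile (· != ':') = ':' :: r := by
      rw [List.dropWhile_append]
      rw [List.dropWhile_eq_nil_iff.mpr (by intro c hc; simpa using hk c hc)]
      simp
    rw [htk, hdk]
    simp
  · rintro ⟨hne, htk⟩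
    obtain ⟨x, t, hxt⟩ : ∃ x t, ls.dropWhile (· != ':') = x :: t := by
      cases hd : ls.dropWhile (· != ':') with
      | nil => rw [hd] at hne; simp at hne
      | cons x t => exact ⟨x, t, rfl⟩
    have hx : x = ':' := by simpa using pm_dropWhile_head (· != ':') ls x t hxt
    refine ⟨t, ?_⟩
    conv_rhs => rw [← List.takeWhile_append_dropWhile (p := (· != ':')) (l := ls)]
    rw [hxt, hx, htk]
    simp

-- the colon-free and pairwise-distinctness facts about the four labels
lemma pm_all_ne {k : List Char} (h : k.all (· != ':') = true) : ∀ c ∈ k, c ≠ ':' := by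
  rw [List.all_eq_true] at h
  intro c hc
  simpa using h c hc
lemma pm_hk1 : ∀ c ∈ pmK1, c ≠ ':' := pm_all_ne rfl
lemma pm_hk2 : ∀ c ∈ pmK2, c ≠ ':' := pm_all_ne rfl
lemma pm_hk3 : ∀ c ∈ pmK3, c ≠ ':' := pm_all_ne rfl
lemma pm_hk4 : ∀ c ∈ pmK4, c ≠ ':' := pm_all_ne rfl
lemma pm_len_ne {a b : List Char} (h : a.length ≠ b.length) : a ≠ b :=
  fun he => h (congrArg List.length he)
lemma pm_ne21 : pmK2 ≠ pmK1 := pm_len_ne (by simp [pmK1, pmK2])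
lemma pm_ne31 : pmK3 ≠ pmK1 := pm_len_ne (by simp [pmK1, pmK3])
lemma pm_ne41 : pmK4 ≠ pmK1 := pm_len_ne (by simp [pmK1, pmK4])
lemma pm_ne12 : pmK1 ≠ pmK2 := pm_ne21.symm
lemma pm_ne32 : pmK3 ≠ pmK2 := pm_len_ne (by simp [pmK2, pmK3])
lemma pm_ne42 : pmK4 ≠ pmK2 := pm_len_ne (by simp [pmK2, pmK4])
lemma pm_ne13 : pmK1 ≠ pmK3 := pm_ne31.symm
lemma pm_ne23 : pmK2 ≠ pmK3 := pm_ne32.symm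
lemma pm_ne43 : pmK4 ≠ pmK3 := pm_len_ne (by simp [pmK3, pmK4])
lemma pm_ne14 : pmK1 ≠ pmK4 := pm_ne41.symm
lemma pm_ne24 : pmK2 ≠ pmK4 := pm_ne42.symm
lemma pm_ne34 : pmK3 ≠ pmK4 := pm_ne43.symm

-- projection of B's index onto A's four fields
def pmProj (d : PySem.Dict (List Char) (List Char)) : List Char × List Char × List Char × List Char :=
  (d.getD pmK1 [], d.getD pmK2 [], d.getD pmK3 [], d.getD pmK4 [])

-- one line: A's branch chain = B's indexing step, through the projection
lemma pm_step (d : PySem.Dict (List Char) (List Char)) (ln : List Char) :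
    pmStepA (pmProj d) ln = pmProj (pmIndexLine d ln) := by
  simp only [pmStepA, pmIndexLine]
  generalize PySem.Chars.strip ln = s
  rw [show ("- team latest tag:".toList) = pmK1 ++ [':'] from rfl,
      show ("- team latest status:".toList) = pmK2 ++ [':'] from rfl,
      show ("- draft latest tag:".toList) = pmK3 ++ [':'] from rfl,
      show ("- draft latest status:".toList) = pmK4 ++ [':'] from rfl]
  by_cases hE : (s.dropWhile (· != ':')).isEmpty = true
  · have hc : ∀ k : List Char, (∀ c ∈ k, c ≠ ':') →
        ¬ PySem.Chars.startswith (PySem.Chars.lower s) (k ++ [':']) = true := by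
      intro k hk hcon
      have := (pm_sw _ _ hk).mp hcon
      rw [pm_lower_dropWhile] at this
      exact this.1 (by simpa [PySem.Chars.lower] using hE)
    rw [if_neg (hc pmK1 pm_hk1), if_neg (hc pmK2 pm_hk2), if_neg (hc pmK3 pm_hk3),
        if_neg (hc pmK4 pm_hk4), if_pos hE]
  · have hsp := pm_split_eq s
    rw [if_neg hE] at hsp
    have hcond : ∀ k : List Char, (∀ c ∈ k, c ≠ ':') →
        (PySem.Chars.startswith (PySem.Chars.lower s) (k ++ [':']) = true ↔
          PySem.Chars.lower (s.takeWhile (· != ':')) = k) := by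
      intro k hk
      rw [pm_sw _ _ hk, pm_lower_dropWhile, pm_lower_takeWhile]
      have : ¬ ((PySem.Chars.lower (s.dropWhile (· != ':'))).isEmpty = true) := by
        simpa [PySem.Chars.lower] using hE
      tauto
    have hget : PySem.List.pyGetD
        [s.takeWhile (· != ':'), (s.dropWhile (· != ':')).tail] 1 ([] : List Char)
        = (s.dropWhile (· != ':')).tail := rfl
    rw [hsp, hget, if_neg hE]
    set key := PySem.Chars.lower (s.takeWhile (· != ':')) with hkey
    set val := PySem.Chars.strip ((s.dropWhile (· != ':')).tail) with hval
    by_cases h1 : key = pmK1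
    · rw [if_pos ((hcond pmK1 pm_hk1).mpr h1)]
      simp [pmProj, PySem.Dict.getD_insert, h1, pm_ne21, pm_ne31, pm_ne41]
    rw [if_neg (fun hcon => h1 ((hcond pmK1 pm_hk1).mp hcon))]
    by_cases h2 : key = pmK2
    · rw [if_pos ((hcond pmK2 pm_hk2).mpr h2)]
      simp [pmProj, PySem.Dict.getD_insert, h2, pm_ne12, pm_ne32, pm_ne42]
    rw [if_neg (fun hcon => h2 ((hcond pmK2 pm_hk2).mp hcon))]
    by_cases h3 : key = pmK3
    · rw [if_pos ((hcond pmK3 pm_hk3).mpr h3)]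
      simp [pmProj, PySem.Dict.getD_insert, h3, pm_ne13, pm_ne23, pm_ne43]
    rw [if_neg (fun hcon => h3 ((hcond pmK3 pm_hk3).mp hcon))]
    by_cases h4 : key = pmK4
    · rw [if_pos ((hcond pmK4 pm_hk4).mpr h4)]
      simp [pmProj, PySem.Dict.getD_insert, h4, pm_ne14, pm_ne24, pm_ne34]
    rw [if_neg (fun hcon => h4 ((hcond pmK4 pm_hk4).mp hcon))]
    simp [pmProj, PySem.Dict.getD_insert, Ne.symm h1, Ne.symm h2, Ne.symm h3, Ne.symm h4]

lemma pm_fold (lines : List (List Char)) : ∀ (d : PySem.Dict (List Char) (List Char)),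
    lines.foldl pmStepA (pmProj d) = pmProj (lines.foldl pmIndexLine d) := by
  induction lines with
  | nil => intro d; rfl
  | cons ln rest ih =>
      intro d
      simp only [List.foldl_cons, pm_step d ln]
      exact ih _

-- ===== VERDICT (by name: the statement is the Claim_ definition above) =====
theorem parse_project_map_auto_state_py_spec : Claim_equal_parse_project_map_auto_state_py := by
  intro text _
  unfold Spec_parse_project_map_auto_state_py
  simp only [parse_project_map_auto_state_py, parse_project_map_auto_state_py_alt]
  by_cases hg : (!(PySem.Chars.isIn pmAS text.toList) || !(PySem.Chars.isIn pmAE text.toList)) = true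
  · rw [if_pos hg, if_pos hg]
    rfl
  · rw [if_neg hg, if_neg hg]
    have hinit : (([], [], [], []) : List Char × List Char × List Char × List Char)
        = pmProj PySem.Dict.empty := rfl
    rw [hinit, pm_fold]
    rfl
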